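-- pv_equiv track=rewrite | github.com/Azure/cyclecloud-hpcpack | hpcpack-autoscaler/src/cyclecloud-hpcpack/caseinsensitive.py | ci_interset
-- ===== SOURCE A (Python) =====
-- from typing import Any, Dict, List, Optional, Union, Set
--
-- def ci_equals(a:Optional[str], b:Optional[str]) -> bool:
--     if a is None or b is None:
--         return a == b
--     return a.casefold() == b.casefold()
--
-- def ci_in(a:str, b:Union[List[str], Set[str], Dict[str, Any]]) -> bool:
--     if isinstance(b, dict):
--         b = b.keys()
--     for c in b:
--         if ci_equals(a, c):
--             return True
--     return False
--
-- def ci_set(a:Union[List[str], Set[str]]) -> Set[str]: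
--     dic: Dict[str, str] = {}
--     for c in a:
--         if c.casefold() in dic:
--             continue
--         dic[c.casefold()] = c
--     return set(dic.values())
--
-- def ci_interset(a:Union[List[str], Set[str]], b:Union[List[str], Set[str]]) -> Set[str]:
--     r = set()
--     a = ci_set(a)
--     b = ci_set(b)
--     for c in a:
--         if ci_in(c, b):
--             r.add(c)
--     return r
-- ===== SOURCE B (Python) =====
-- def ci_interset(a, b):
--     bcf = {x.casefold() for x in b}
--     out = set()
--     seen = set()
--     for c in a:
--         k = c.casefold()
--         if k in bcf and k not in seen:
--             seen.add(k)
--             out.add(c)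
--     return out
-- ===== Notes on version B (the rewrite author's own statement) =====
-- stated objective: faster
-- what changed: B fuses everything into one pass over a with an accumulator: no ci_set staging of either side and no per-element linear ci_in scan; a single loop keeps a set of already-accepted casefolds (dedup fused into the accept test) and tests each element's casefold against a set of b's casefolds built once.
import Mathlib
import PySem

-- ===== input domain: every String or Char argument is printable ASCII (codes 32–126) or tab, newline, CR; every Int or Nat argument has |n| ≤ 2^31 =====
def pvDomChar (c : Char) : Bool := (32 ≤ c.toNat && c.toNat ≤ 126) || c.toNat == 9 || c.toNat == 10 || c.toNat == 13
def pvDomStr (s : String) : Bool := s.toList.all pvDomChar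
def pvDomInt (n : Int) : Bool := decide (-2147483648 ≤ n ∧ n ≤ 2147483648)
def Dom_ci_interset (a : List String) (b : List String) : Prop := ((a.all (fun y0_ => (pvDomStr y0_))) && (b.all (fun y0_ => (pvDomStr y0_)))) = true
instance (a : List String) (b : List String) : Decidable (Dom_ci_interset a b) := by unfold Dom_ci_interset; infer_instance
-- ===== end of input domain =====

-- B is a single fused pass over `a` with an accumulator: no ci_set staging of either side and no
-- per-element ci_in scan — one loop keeps the set of already-accepted casefolds and tests each
-- element's casefold against a set of b's casefolds built once (objective: faster).
-- str.casefold() is modelled by PySem.Str.lower, exact on the ASCII domain Dom_ci_interset.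

-- ===== PORT A =====
-- the dict-building loop body of ci_set (named helper; the loop itself stays in ciSet)
def ciStep (d : PySem.Dict String String) (c : String) : PySem.Dict String String :=
  if d.contains (PySem.Str.lower c) then d else d.insert (PySem.Str.lower c) c

def ciEquals (a : Option String) (b : Option String) : Bool :=
  match a, b with
  | some x, some y => PySem.Str.lower x == PySem.Str.lower y
  | x, y => x == y

def ciIn (a : String) (b : List String) : Bool :=
  b.any (fun c => ciEquals (some a) (some c))

def ciSet (a : List String) : List String :=
  let dic : PySem.Dict String String := a.foldl ciStep PySem.Dict.empty
  PySem.Set.ofList dic.values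

def ci_interset (a : List String) (b : List String) : List String :=
  let sa := ciSet a
  let sb := ciSet b
  sa.foldl (fun r c => if ciIn c sb then PySem.Set.add r c else r) PySem.Set.empty

-- ===== PORT B =====
-- the loop body of B's single pass (out, seen) over a
def bStep (bcf : PySem.Set String) (p : List String × PySem.Set String) (c : String) :
    List String × PySem.Set String :=
  let k := PySem.Str.lower c
  if PySem.Set.contains bcf k && !PySem.Set.contains p.2 k then
    (PySem.Set.add p.1 c, PySem.Set.add p.2 k)
  else p

def ci_interset_alt (a : List String) (b : List String) : List String :=
  let bcf : PySem.Set String := PySem.Set.ofList (b.map PySem.Str.lower)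
  let res := a.foldl (bStep bcf) (PySem.Set.empty, PySem.Set.empty)
  res.1

-- ===== PRECONDITION & SPEC =====
def Spec_ci_interset (a : List String) (b : List String) (out : List String) : Prop := out = ci_interset_alt a b
instance (a : List String) (b : List String) (out : List String) : Decidable (Spec_ci_interset a b out) := by unfold Spec_ci_interset; infer_instance

-- ===== CLAIM =====
def Claim_equal_ci_interset : Prop := ∀ (a : List String) (b : List String), Dom_ci_interset a b → Spec_ci_interset a b (ci_interset a b)

-- ===== LEMMAS AND PROOFS =====

-- invariants of the dict built by A's ci_set
lemma dict_inv (xs : List String) (d : PySem.Dict String String)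
    (hnd : d.keys.Nodup) (hinv : ∀ p ∈ d.items, PySem.Str.lower p.2 = p.1) :
    (xs.foldl ciStep d).keys.Nodup ∧
    (∀ p ∈ (xs.foldl ciStep d).items, PySem.Str.lower p.2 = p.1) ∧
    (∀ k, (xs.foldl ciStep d).contains k = (d.contains k || decide (k ∈ xs.map PySem.Str.lower))) := by
  induction xs generalizing d with
  | nil => exact ⟨hnd, hinv, fun k => by simp⟩
  | cons c xs ih =>
    simp only [List.foldl_cons]
    have hstep : (ciStep d c).keys.Nodup ∧
        (∀ p ∈ (ciStep d c).items, PySem.Str.lower p.2 = p.1) ∧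
        (∀ k, (ciStep d c).contains k = (d.contains k || decide (k = PySem.Str.lower c))) := by
      unfold ciStep
      by_cases h : d.contains (PySem.Str.lower c) = true
      · refine ⟨by simpa [h] using hnd, by simpa [h] using hinv, ?_⟩
        intro k
        simp only [if_pos h]
        by_cases hk : k = PySem.Str.lower c
        · subst hk; simp [h]
        · simp [hk]
      · refine ⟨?_, ?_, ?_⟩
        · simpa [h] using PySem.Dict.nodup_keys_insert d _ c hnd
        · intro p hp
          rw [if_neg h] at hp
          rcases (PySem.Dict.mem_items_insert _ _ _ _).1 hp with h1 | h1
          · subst h1; rfl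
          · exact hinv p h1.1
        · intro k
          simp only [if_neg h, PySem.Dict.contains_insert]
          by_cases hk : k = PySem.Str.lower c
          · subst hk; simp
          · simp only [hk, decide_false, Bool.or_false]
            simp [hk]
    obtain ⟨h1, h2, h3⟩ := ih (ciStep d c) hstep.1 hstep.2.1
    refine ⟨h1, h2, ?_⟩
    intro k
    rw [h3 k, hstep.2.2 k]
    simp only [List.map_cons, List.mem_cons]
    by_cases hk : k = PySem.Str.lower c <;> simp [hk]

-- A's final loop: fold with Set.add over a list disjoint from the accumulator is append-filter
lemma foldl_add_eq_filter (q : String → Bool) :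
    ∀ (l r : List String), (r ++ l).Nodup →
      l.foldl (fun r c => if q c then PySem.Set.add r c else r) r = r ++ l.filter q := by
  intro l
  induction l with
  | nil => intro r _; simp
  | cons c l ih =>
    intro r hnd
    have hc : c ∉ r := by
      intro h
      exact (List.disjoint_of_nodup_append hnd) h (by simp)
    simp only [List.foldl_cons]
    by_cases hq : q c = true
    · rw [if_pos hq, PySem.Set.add_of_not_mem hc,
        ih (r ++ [c]) (by simpa using hnd), List.filter_cons_of_pos hq]
      simp
    · rw [if_neg hq, ih r (hnd.sublist ((List.sublist_cons_self c l).append_left r)),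
        List.filter_cons_of_neg (by simpa using hq)]

lemma lower_mem_keys_iff (d : PySem.Dict String String)
    (hinv : ∀ p ∈ d.items, PySem.Str.lower p.2 = p.1) (s : String) :
    (∃ v ∈ d.values, PySem.Str.lower s = PySem.Str.lower v) ↔ PySem.Str.lower s ∈ d.keys := by
  simp only [PySem.Dict.values, PySem.Dict.keys, List.mem_map]
  constructor
  · rintro ⟨v, ⟨p, hp, rfl⟩, hv⟩
    exact ⟨p, hp, by rw [← hinv p hp, ← hv]⟩
  · rintro ⟨p, hp, hk⟩
    exact ⟨p.2, ⟨p, hp, rfl⟩, by rw [hinv p hp, hk]⟩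

-- the fusion lemma: B's single pass produces exactly the filtered values of A's dict fold
lemma fuse (bcf : PySem.Set String) (xs : List String) :
    ∀ (d : PySem.Dict String String) (out : List String) (S : PySem.Set String),
    d.keys.Nodup →
    (∀ p ∈ d.items, PySem.Str.lower p.2 = p.1) →
    (∀ k, PySem.Set.contains S k = (d.contains k && PySem.Set.contains bcf k)) →
    (∀ v ∈ out, d.contains (PySem.Str.lower v) = true) →
    ∃ L, ((xs.foldl ciStep d).values).filter (fun c => PySem.Set.contains bcf (PySem.Str.lower c))
            = d.values.filter (fun c => PySem.Set.contains bcf (PySem.Str.lower c)) ++ L ∧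
         (xs.foldl (bStep bcf) (out, S)).1 = out ++ L := by
  induction xs with
  | nil => intro d out S _ _ _ _; exact ⟨[], by simp, by simp⟩
  | cons c xs ih =>
    intro d out S hnd hinv hS hout
    simp only [List.foldl_cons]
    by_cases hc : d.contains (PySem.Str.lower c) = true
    · -- A skips (key present); B skips too (either seen, or casefold not in bcf)
      have hA : ciStep d c = d := by simp [ciStep, hc]
      have hBs : bStep bcf (out, S) c = (out, S) := by
        by_cases hqc : PySem.Set.contains bcf (PySem.Str.lower c) = true
        · have hSin : PySem.Str.lower c ∈ S :=
            (PySem.Set.contains_iff _ _).1 (by rw [hS, hc, hqc]; rfl)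
          simp [bStep, hSin]
        · have hnot : PySem.Str.lower c ∉ bcf := fun h => hqc ((PySem.Set.contains_iff _ _).2 h)
          simp [bStep, hnot]
      rw [hA, hBs]
      exact ih d out S hnd hinv hS hout
    · have hcf : d.contains (PySem.Str.lower c) = false := by simpa using hc
      have hA : ciStep d c = d.insert (PySem.Str.lower c) c := by simp [ciStep, hcf]
      have hSc : PySem.Set.contains S (PySem.Str.lower c) = false := by
        rw [hS, hcf]; simp
      have hval : (d.insert (PySem.Str.lower c) c).values = d.values ++ [c] := by
        simp [PySem.Dict.values, PySem.Dict.items_insert_of_not_contains d c hcf]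
      have hnd' : (d.insert (PySem.Str.lower c) c).keys.Nodup :=
        PySem.Dict.nodup_keys_insert d _ c hnd
      have hinv' : ∀ p ∈ (d.insert (PySem.Str.lower c) c).items, PySem.Str.lower p.2 = p.1 := by
        intro p hp
        rcases (PySem.Dict.mem_items_insert _ _ _ _).1 hp with h1 | h1
        · subst h1; rfl
        · exact hinv p h1.1
      by_cases hq : PySem.Set.contains bcf (PySem.Str.lower c) = true
      · -- fresh key, casefold in b: A records it, B accepts it
        have hqm : PySem.Str.lower c ∈ bcf := (PySem.Set.contains_iff _ _).1 hq
        have hSnot : PySem.Str.lower c ∉ S := fun h => by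
          rw [(PySem.Set.contains_iff _ _).2 h] at hSc; exact Bool.noConfusion hSc
        have hBs : bStep bcf (out, S) c
            = (PySem.Set.add out c, PySem.Set.add S (PySem.Str.lower c)) := by
          simp [bStep, hqm, hSnot]
        have hcnotout : c ∉ out := fun h => by simp [hout c h] at hcf
        have hS' : ∀ k, PySem.Set.contains (PySem.Set.add S (PySem.Str.lower c)) k
            = ((d.insert (PySem.Str.lower c) c).contains k && PySem.Set.contains bcf k) := by
          intro k
          rw [PySem.Dict.contains_insert]
          by_cases hk : k = PySem.Str.lower c
          · subst hk
            simp [(PySem.Set.mem_add _ _ _).2 (Or.inr (rfl : PySem.Str.lower c = PySem.Str.lower c)), hqm]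
          · have hadd : PySem.Set.contains (PySem.Set.add S (PySem.Str.lower c)) k
                = PySem.Set.contains S k := by
              cases h : PySem.Set.contains S k
              · simp only [PySem.Set.contains_eq_listContains] at h ⊢
                simp only [List.contains_eq_mem, decide_eq_false_iff_not] at h ⊢
                intro hmem
                rcases (PySem.Set.mem_add _ _ _).1 hmem with h1 | h1
                · exact h h1
                · exact hk h1
              · simp only [PySem.Set.contains_eq_listContains] at h ⊢
                simp only [List.contains_eq_mem, decide_eq_true_eq] at h ⊢
                exact (PySem.Set.mem_add _ _ _).2 (Or.inl h)
            rw [hadd, hS k]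
            simp [show (k == PySem.Str.lower c) = false by simpa using hk]
        have hout' : ∀ v ∈ PySem.Set.add out c,
            (d.insert (PySem.Str.lower c) c).contains (PySem.Str.lower v) = true := by
          intro v hv
          rw [PySem.Set.add_of_not_mem hcnotout] at hv
          rw [PySem.Dict.contains_insert]
          rcases List.mem_append.1 hv with h1 | h1
          · simp [hout v h1]
          · simp at h1; subst h1; simp
        obtain ⟨L, h1, h2⟩ := ih (d.insert (PySem.Str.lower c) c) (PySem.Set.add out c)
          (PySem.Set.add S (PySem.Str.lower c)) hnd' hinv' hS' hout'
        refine ⟨c :: L, ?_, ?_⟩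
        · rw [hA, h1, hval, List.filter_append, List.filter_singleton]
          simp [hqm]
        · rw [hBs, h2, PySem.Set.add_of_not_mem hcnotout]
          simp
      · -- fresh key, casefold not in b: A records it, B skips; the filter drops it
        have hqf : PySem.Set.contains bcf (PySem.Str.lower c) = false := by simpa using hq
        have hnotq : PySem.Str.lower c ∉ bcf := fun h => by
          rw [(PySem.Set.contains_iff _ _).2 h] at hqf; exact Bool.noConfusion hqf
        have hBs : bStep bcf (out, S) c = (out, S) := by
          simp [bStep, hnotq]
        have hS' : ∀ k, PySem.Set.contains S k
            = ((d.insert (PySem.Str.lower c) c).contains k && PySem.Set.contains bcf k) := by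
          intro k
          rw [PySem.Dict.contains_insert]
          by_cases hk : k = PySem.Str.lower c
          · subst hk; rw [hS, hcf, hqf]; simp
          · rw [hS k]
            simp [show (k == PySem.Str.lower c) = false by simpa using hk]
        have hout' : ∀ v ∈ out,
            (d.insert (PySem.Str.lower c) c).contains (PySem.Str.lower v) = true := by
          intro v hv
          rw [PySem.Dict.contains_insert]
          simp [hout v hv]
        obtain ⟨L, h1, h2⟩ := ih (d.insert (PySem.Str.lower c) c) out S hnd' hinv' hS' hout'
        refine ⟨L, ?_, ?_⟩
        · rw [hA, h1, hval, List.filter_append, List.filter_singleton]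
          simp [hnotq]
        · rw [hBs]; exact h2

lemma ci_interset_eq (a b : List String) : ci_interset a b = ci_interset_alt a b := by
  obtain ⟨hndA, hinvA, _⟩ :=
    dict_inv a PySem.Dict.empty (by simp [pysem]) (by intro p hp; simp [PySem.Dict.empty] at hp)
  obtain ⟨hndB, hinvB, hconB⟩ :=
    dict_inv b PySem.Dict.empty (by simp [pysem]) (by intro p hp; simp [PySem.Dict.empty] at hp)
  set da := a.foldl ciStep PySem.Dict.empty with hda
  set db := b.foldl ciStep PySem.Dict.empty with hdb
  set bcf : PySem.Set String := PySem.Set.ofList (b.map PySem.Str.lower) with hbcf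
  have hmapA : da.values.map PySem.Str.lower = da.keys := by
    simp only [PySem.Dict.values, PySem.Dict.keys, List.map_map]
    exact List.map_congr_left (fun p hp => hinvA p hp)
  have hvndA : da.values.Nodup := List.Nodup.of_map _ (hmapA ▸ hndA)
  have hmapB : db.values.map PySem.Str.lower = db.keys := by
    simp only [PySem.Dict.values, PySem.Dict.keys, List.map_map]
    exact List.map_congr_left (fun p hp => hinvB p hp)
  have hvndB : db.values.Nodup := List.Nodup.of_map _ (hmapB ▸ hndB)
  -- A's result is da.values filtered by membership of the casefold in b's casefolds
  have hA : ci_interset a b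
      = da.values.filter (fun c => PySem.Set.contains bcf (PySem.Str.lower c)) := by
    simp only [ci_interset, ciSet, ← hda, ← hdb,
      PySem.Set.ofList_eq_self_of_nodup _ hvndA, PySem.Set.ofList_eq_self_of_nodup _ hvndB]
    rw [show PySem.Set.empty = ([] : List String) from rfl,
      foldl_add_eq_filter _ da.values [] (by simpa using hvndA), List.nil_append]
    refine List.filter_congr (fun c _ => ?_)
    rw [Bool.eq_iff_iff]
    simp only [ciIn, ciEquals, List.any_eq_true, beq_iff_eq]
    rw [lower_mem_keys_iff db hinvB c, ← PySem.Dict.contains_iff_mem_keys, hconB,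
      PySem.Dict.contains_empty]
    simp [hbcf, PySem.Set.mem_ofList]
  obtain ⟨L, h1, h2⟩ := fuse bcf a PySem.Dict.empty [] PySem.Set.empty
    (by simp [pysem]) (by intro p hp; simp [PySem.Dict.empty] at hp)
    (by intro k; simp [PySem.Set.empty, PySem.Set.contains_eq_listContains])
    (by intro v hv; simp at hv)
  have h1' : da.values.filter (fun c => PySem.Set.contains bcf (PySem.Str.lower c)) = L := by
    simpa [← hda, PySem.Dict.values, PySem.Dict.empty] using h1
  rw [hA, h1']
  simp only [ci_interset_alt, ← hbcf]
  rw [show (PySem.Set.empty : PySem.Set String) = ([] : List String) from rfl] at h2 ⊢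
  rw [h2]
  simp

-- ===== VERDICT =====
theorem ci_interset_spec : Claim_equal_ci_interset := by
  intro a b _
  exact ci_interset_eq a b
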